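-- pv_equiv track=rewrite | github.com/firstcarlos1/family-classifier | app - สำเนา (2).py | is_same_sex_couple_family
-- ===== SOURCE A (Python) =====
-- def is_same_sex_couple_family(members):
--     """ครอบครัวคู่รักเพศเดียวกัน: สามี+ภรรยา เพศเดียวกัน"""
--     husband = None
--     wife = None
--
--     for member in members:
--         if member['relation'] == 'husband':
--             husband = member
--         elif member['relation'] == 'wife':
--             wife = member
--
--     # ต้องมีสามีและภรรยา
--     if not husband or not wife:
--         return False
--
--     # ต้องเป็นเพศเดียวกัน
--     return husband['gender'] == wife['gender']
-- ===== SOURCE B (Python) =====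
-- def is_same_sex_couple_family(members):
--     """ครอบครัวคู่รักเพศเดียวกัน: สามี+ภรรยา เพศเดียวกัน"""
--     def last_with_relation(rel):
--         # scan back-to-front; the first match from the end is A's last assignment
--         for m in reversed(members):
--             if m['relation'] == rel:
--                 return m
--         return None
--
--     husband = last_with_relation('husband')
--     wife = last_with_relation('wife')
--     if husband is None or wife is None:
--         return False
--     return husband['gender'] == wife['gender']
-- ===== Notes on version B (the rewrite author's own statement) =====
-- stated objective: alternative
-- what changed: Replaces the forward full scan with two reassigned tracking variables by two back-to-front scans with early exit (first match from the end = last occurrence), then a plain None check.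
import Mathlib
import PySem

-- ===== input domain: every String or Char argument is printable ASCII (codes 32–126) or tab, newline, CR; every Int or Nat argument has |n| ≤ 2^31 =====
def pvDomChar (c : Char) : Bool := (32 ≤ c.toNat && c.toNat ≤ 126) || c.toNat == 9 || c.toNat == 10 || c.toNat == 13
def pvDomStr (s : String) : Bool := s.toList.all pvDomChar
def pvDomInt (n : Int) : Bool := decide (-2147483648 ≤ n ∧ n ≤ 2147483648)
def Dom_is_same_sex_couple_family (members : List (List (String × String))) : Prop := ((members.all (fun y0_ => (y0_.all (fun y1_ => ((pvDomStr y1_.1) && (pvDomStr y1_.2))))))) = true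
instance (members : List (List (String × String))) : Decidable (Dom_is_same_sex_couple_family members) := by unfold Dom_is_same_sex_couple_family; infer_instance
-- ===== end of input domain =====

-- B scans the member list back-to-front with early exit instead of A's forward scan with reassignment; equivalence of the return value is proved on Pre_ (where A raises no KeyError).

-- ===== PORT A =====
-- dict lookup (first match in insertion order, exact for Python dicts built without duplicate keys)
def getKeyA? (m : List (String × String)) (k : String) : Option String :=
  (m.find? (fun kv => kv.1 == k)).map (fun kv => kv.2)

-- forward loop: husband/wife reassigned on every matching member (last one wins)
def is_same_sex_couple_family (members : List (List (String × String))) : Bool :=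
  let st := members.foldl
    (fun (st : Option (List (String × String)) × Option (List (String × String))) m =>
      if getKeyA? m "relation" == some "husband" then (some m, st.2)
      else if getKeyA? m "relation" == some "wife" then (st.1, some m)
      else st)
    (none, none)
  match st.1 with
  | none => false
  | some h =>
    match st.2 with
    | none => false
    | some w => getKeyA? h "gender" == getKeyA? w "gender"

-- ===== PORT B =====
-- same dict lookup, B's own copy
def getKeyB? (m : List (String × String)) (k : String) : Option String :=
  List.lookup k m

-- reversed loop with early return = find? on the reversed list
def lastWithRelation (members : List (List (String × String))) (rel : String) :
    Option (List (String × String)) :=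
  members.reverse.find? (fun m => getKeyB? m "relation" == some rel)

def is_same_sex_couple_family_alt (members : List (List (String × String))) : Bool :=
  match lastWithRelation members "husband", lastWithRelation members "wife" with
  | some h, some w => getKeyB? h "gender" == getKeyB? w "gender"
  | _, _ => false

-- ===== PRECONDITION & SPEC =====
-- Pre_'s own key-lookup (kept separate from the ports' helpers)
def preGet? (m : List (String × String)) (k : String) : Option String :=
  ((m.filter (fun kv => kv.1 == k)).head?).map (fun kv => kv.2)

-- Pre_ excludes exactly the inputs where Python A raises KeyError: a member without a
-- 'relation' key, or (when both a husband and a wife are present) the last husband or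
-- last wife lacking a 'gender' key.
def preB (members : List (List (String × String))) : Bool :=
  members.all (fun m => (preGet? m "relation").isSome) &&
  (let hl := (members.filter (fun m => preGet? m "relation" == some "husband")).getLast?
   let wl := (members.filter (fun m => preGet? m "relation" == some "wife")).getLast?
   !(hl.isSome && wl.isSome) ||
     (hl.any (fun h => (preGet? h "gender").isSome) && wl.any (fun w => (preGet? w "gender").isSome)))

def Pre_is_same_sex_couple_family (members : List (List (String × String))) : Prop :=
  preB members = true

instance (members : List (List (String × String))) : Decidable (Pre_is_same_sex_couple_family members) := by unfold Pre_is_same_sex_couple_family; infer_instance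

def pvWitness_is_same_sex_couple_family : (List (List (String × String))) :=
  [[("relation", "husband"), ("gender", "m")], [("relation", "wife"), ("gender", "m")]]

def Spec_is_same_sex_couple_family (members : List (List (String × String))) (out : Bool) : Prop := out = is_same_sex_couple_family_alt members
instance (members : List (List (String × String))) (out : Bool) : Decidable (Spec_is_same_sex_couple_family members out) := by unfold Spec_is_same_sex_couple_family; infer_instance

-- ===== CLAIM (what is proved, stated in full; the proofs are below) =====
def Claim_equal_is_same_sex_couple_family : Prop := ∀ (members : List (List (String × String))), Dom_is_same_sex_couple_family members → Pre_is_same_sex_couple_family members → Spec_is_same_sex_couple_family members (is_same_sex_couple_family members)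

-- ===== LEMMAS AND PROOFS =====

theorem getKeyB_eq_A (m : List (String × String)) (k : String) : getKeyB? m k = getKeyA? m k := by
  induction m with
  | nil => rfl
  | cons kv t ih =>
    obtain ⟨k1, v1⟩ := kv
    simp only [getKeyB?, getKeyA?, List.lookup, List.find?] at *
    by_cases h : k1 = k
    · subst h; simp
    · have h1 : (k == k1) = false := by simp [Ne.symm h]
      have h2 : (k1 == k) = false := by simp [h]
      simp [h1, h2, ih]

-- the foldl pair equals (last husband, last wife), each as find? on the reversed list
theorem foldl_eq_find? (members : List (List (String × String)))
    (a b : Option (List (String × String))) :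
    members.foldl
      (fun (st : Option (List (String × String)) × Option (List (String × String))) m =>
        if getKeyA? m "relation" == some "husband" then (some m, st.2)
        else if getKeyA? m "relation" == some "wife" then (st.1, some m)
        else st)
      (a, b)
    = ((members.reverse.find? (fun m => getKeyA? m "relation" == some "husband")).orElse (fun _ => a),
       (members.reverse.find? (fun m => getKeyA? m "relation" == some "wife")).orElse (fun _ => b)) := by
  induction members generalizing a b with
  | nil => simp
  | cons m t ih =>
    simp only [List.foldl_cons, List.reverse_cons, List.find?_append]
    by_cases hH : (getKeyA? m "relation" == some "husband") = true
    · have hW : (getKeyA? m "relation" == some "wife") = false := by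
        revert hH; cases getKeyA? m "relation" <;> simp_all
      rw [if_pos hH, ih]
      simp only [List.find?_cons, hH, hW, List.find?_nil]
      cases t.reverse.find? (fun m => getKeyA? m "relation" == some "husband") <;>
        cases t.reverse.find? (fun m => getKeyA? m "relation" == some "wife") <;> rfl
    · by_cases hW : (getKeyA? m "relation" == some "wife") = true
      · rw [if_neg hH, if_pos hW, ih]
        simp only [List.find?_cons, hH, hW, List.find?_nil]
        cases t.reverse.find? (fun m => getKeyA? m "relation" == some "husband") <;>
          cases t.reverse.find? (fun m => getKeyA? m "relation" == some "wife") <;> rfl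
      · rw [if_neg hH, if_neg hW, ih]
        simp only [List.find?_cons, hH, hW, List.find?_nil]
        cases t.reverse.find? (fun m => getKeyA? m "relation" == some "husband") <;>
          cases t.reverse.find? (fun m => getKeyA? m "relation" == some "wife") <;> rfl

-- ===== VERDICT (by name: the statement is the Claim_ definition above) =====
theorem is_same_sex_couple_family_spec : Claim_equal_is_same_sex_couple_family := by
  intro members _ _
  unfold Spec_is_same_sex_couple_family is_same_sex_couple_family is_same_sex_couple_family_alt lastWithRelation
  simp only [getKeyB_eq_A]
  rw [foldl_eq_find?]
  cases members.reverse.find? (fun m => getKeyA? m "relation" == some "husband") <;>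
    cases members.reverse.find? (fun m => getKeyA? m "relation" == some "wife") <;>
    simp [Option.orElse]
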